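-- pv_equiv track=rewrite | github.com/AbdurRafaybahria/Process-Optimization-Agent | process_optimization_agent/visualizer.py | _get_task_type
-- ===== SOURCE A (Python) =====
-- def _get_task_type(task_name: str) -> str:
--     """Determine task type based on name"""
--     name_lower = task_name.lower()
--     if any(x in name_lower for x in ['test', 'qa', 'quality']):
--         return 'testing'
--     elif any(x in name_lower for x in ['design', 'ui', 'ux']):
--         return 'design'
--     elif any(x in name_lower for x in ['review', 'audit']):
--         return 'review'
--     elif any(x in name_lower for x in ['doc', 'manual', 'guide']):
--         return 'documentation'
--     elif any(x in name_lower for x in ['deploy', 'release', 'production']):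
--         return 'deployment'
--     elif any(x in name_lower for x in ['dev', 'implement', 'code', 'program']):
--         return 'development'
--     return 'other'
-- ===== SOURCE B (Python) =====
-- _KEYWORD_RANKS = [
--     ('test', 0), ('qa', 0), ('quality', 0),
--     ('design', 1), ('ui', 1), ('ux', 1),
--     ('review', 2), ('audit', 2),
--     ('doc', 3), ('manual', 3), ('guide', 3),
--     ('deploy', 4), ('release', 4), ('production', 4),
--     ('dev', 5), ('implement', 5), ('code', 5), ('program', 5),
-- ]
-- _CATEGORIES = ['testing', 'design', 'review', 'documentation', 'deployment', 'development']
--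
-- def _get_task_type(task_name: str) -> str:
--     name_lower = task_name.lower()
--     best = None
--     for kw, rank in _KEYWORD_RANKS:
--         if kw in name_lower:
--             best = rank if best is None else min(best, rank)
--     return 'other' if best is None else _CATEGORIES[best]
-- ===== Notes on version B (the rewrite author's own statement) =====
-- stated objective: alternative
-- what changed: Instead of an ordered early-return branch scan, B folds over a flat keyword->rank map keeping the minimum rank among all matching keywords and indexes a category array with it; correct because A's first firing branch is exactly the minimal-rank matching keyword.
import Mathlib
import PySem

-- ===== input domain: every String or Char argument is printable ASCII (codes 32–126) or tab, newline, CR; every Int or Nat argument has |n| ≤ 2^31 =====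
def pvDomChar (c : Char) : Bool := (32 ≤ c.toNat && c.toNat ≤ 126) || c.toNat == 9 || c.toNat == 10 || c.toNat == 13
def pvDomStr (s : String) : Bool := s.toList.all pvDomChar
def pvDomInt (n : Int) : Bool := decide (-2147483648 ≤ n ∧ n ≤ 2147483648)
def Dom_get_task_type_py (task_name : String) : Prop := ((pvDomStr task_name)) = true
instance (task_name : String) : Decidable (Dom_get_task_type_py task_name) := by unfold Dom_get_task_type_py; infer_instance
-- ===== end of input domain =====

-- B replaces A's ordered early-return branch scan by a fold over a flat keyword->rank map that
-- keeps the minimum rank among all matching keywords and then indexes a category array (alternative).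
-- ===== PORT A =====
def get_task_type_py (task_name : String) : String :=
  let name_lower := PySem.Str.lower task_name
  if ["test", "qa", "quality"].any (fun x => PySem.Str.isIn x name_lower) then "testing"
  else if ["design", "ui", "ux"].any (fun x => PySem.Str.isIn x name_lower) then "design"
  else if ["review", "audit"].any (fun x => PySem.Str.isIn x name_lower) then "review"
  else if ["doc", "manual", "guide"].any (fun x => PySem.Str.isIn x name_lower) then "documentation"
  else if ["deploy", "release", "production"].any (fun x => PySem.Str.isIn x name_lower) then "deployment"
  else if ["dev", "implement", "code", "program"].any (fun x => PySem.Str.isIn x name_lower) then "development"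
  else "other"

-- ===== PORT B =====
def keywordRanks : List (String × Nat) :=
  [("test", 0), ("qa", 0), ("quality", 0),
   ("design", 1), ("ui", 1), ("ux", 1),
   ("review", 2), ("audit", 2),
   ("doc", 3), ("manual", 3), ("guide", 3),
   ("deploy", 4), ("release", 4), ("production", 4),
   ("dev", 5), ("implement", 5), ("code", 5), ("program", 5)]

def categories : List String :=
  ["testing", "design", "review", "documentation", "deployment", "development"]

-- one step of Source B's loop: update the best (minimum) rank seen so far
def ttStep (name_lower : String) (best : Option Nat) (p : String × Nat) : Option Nat :=
  if PySem.Str.isIn p.1 name_lower then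
    some (match best with | none => p.2 | some b => min b p.2)
  else best

def get_task_type_py_alt (task_name : String) : String :=
  let name_lower := PySem.Str.lower task_name
  match keywordRanks.foldl (ttStep name_lower) none with
  | none => "other"
  | some b => categories.getD b "other"   -- _CATEGORIES[best]; b is always < 6 here

-- ===== PRECONDITION & SPEC =====
def Spec_get_task_type_py (task_name : String) (out : String) : Prop := out = get_task_type_py_alt task_name
instance (task_name : String) (out : String) : Decidable (Spec_get_task_type_py task_name out) := by unfold Spec_get_task_type_py; infer_instance

-- ===== CLAIM (what is proved, stated in full; the proofs are below) =====
def Claim_equal_get_task_type_py : Prop := ∀ (task_name : String), Dom_get_task_type_py task_name → Spec_get_task_type_py task_name (get_task_type_py task_name)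

-- ===== LEMMAS AND PROOFS =====

-- folding Source B's step over a block of keywords that all carry the same rank r
theorem fold_group (nl : String) (r : Nat) (kws : List String) (acc : Option Nat) :
    List.foldl (ttStep nl) acc (kws.map (fun k => (k, r))) =
      if kws.any (fun x => PySem.Str.isIn x nl) then
        some (match acc with | none => r | some b => min b r)
      else acc := by
  induction kws generalizing acc with
  | nil => simp
  | cons k ks ih =>
    simp only [List.map_cons, List.foldl_cons, List.any_cons, ttStep]
    by_cases h : PySem.Str.isIn k nl = true
    · rw [if_pos h, ih]
      simp only [h, Bool.true_or, if_true]
      cases acc <;> split <;> simp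
    · rw [if_neg h, ih]
      have hf : PySem.Str.isIn k nl = false := by simpa using h
      simp only [hf, Bool.false_or]

theorem keywordRanks_grouped :
    keywordRanks =
      (["test", "qa", "quality"].map (fun k => (k, 0))) ++
      (["design", "ui", "ux"].map (fun k => (k, 1))) ++
      (["review", "audit"].map (fun k => (k, 2))) ++
      (["doc", "manual", "guide"].map (fun k => (k, 3))) ++
      (["deploy", "release", "production"].map (fun k => (k, 4))) ++
      (["dev", "implement", "code", "program"].map (fun k => (k, 5))) := by
  rfl

-- ===== VERDICT (by name: the statement is the Claim_ definition above) =====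
theorem get_task_type_py_spec : Claim_equal_get_task_type_py := by
  intro task_name _
  unfold Spec_get_task_type_py
  simp only [get_task_type_py, get_task_type_py_alt, keywordRanks_grouped, List.foldl_append,
    fold_group]
  generalize PySem.Str.lower task_name = nl
  split_ifs <;> simp_all [categories]
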